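-- pv_equiv track=rewrite | github.com/VectorInstitute/automated_capability_evaluation | src/task_solver/self_contrast/solver.py | _unique_top_group
-- ===== SOURCE A (Python) =====
-- from typing import TYPE_CHECKING, Any, Dict, List, Optional
--
-- def _unique_top_group(
--     groups: List[List[Dict[str, Any]]],
-- ) -> Optional[List[Dict[str, Any]]]:
--     if not groups:
--         return None
--     top_size = max(len(group) for group in groups)
--     top_groups = [group for group in groups if len(group) == top_size]
--     if len(top_groups) != 1:
--         return None
--     return top_groups[0]
-- ===== SOURCE B (Python) =====
-- def _unique_top_group(groups):
--     best_size = -1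
--     best_group = None
--     count = 0
--     for group in groups:
--         n = len(group)
--         if n > best_size:
--             best_size = n
--             best_group = group
--             count = 1
--         elif n == best_size:
--             count += 1
--     return best_group if count == 1 else None
-- ===== Notes on version B (the rewrite author's own statement) =====
-- stated objective: alternative
-- what changed: Replaces the three passes (max over lengths, filter of the top-size groups, length test plus indexing) by one left-to-right pass maintaining best_size, best_group and a count of groups attaining best_size.
import Mathlib
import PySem

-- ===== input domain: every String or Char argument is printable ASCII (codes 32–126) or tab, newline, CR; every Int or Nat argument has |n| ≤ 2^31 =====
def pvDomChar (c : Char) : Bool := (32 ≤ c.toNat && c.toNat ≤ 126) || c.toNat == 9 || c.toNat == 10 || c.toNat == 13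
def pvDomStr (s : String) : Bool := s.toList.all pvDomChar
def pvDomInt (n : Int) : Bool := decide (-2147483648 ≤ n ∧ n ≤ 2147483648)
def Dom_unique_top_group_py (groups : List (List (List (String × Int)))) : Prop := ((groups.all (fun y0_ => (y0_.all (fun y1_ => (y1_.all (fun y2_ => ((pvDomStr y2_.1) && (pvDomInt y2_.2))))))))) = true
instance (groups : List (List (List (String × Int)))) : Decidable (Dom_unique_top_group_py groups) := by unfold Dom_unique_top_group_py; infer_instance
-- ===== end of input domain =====

-- B replaces A's three passes (max, filter, length test + index) by one pass keeping
-- best_size, best_group and a count of groups attaining best_size ("alternative").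

-- ===== PORT A =====
def unique_top_group_py (groups : List (List (List (String × Int)))) : Option (List (List (String × Int))) :=
  if groups = [] then none
  else
    match PySem.List.max? (groups.map (fun group => (group.length : Int))) id with
    | none => none  -- unreachable: groups ≠ []
    | some top_size =>
      let top_groups := groups.filter (fun group => (group.length : Int) == top_size)
      if top_groups.length ≠ 1 then none
      else PySem.List.pyGet? top_groups 0

-- ===== PORT B =====
-- loop body of B's single pass
def pvStep (acc : Int × Option (List (List (String × Int))) × Int)
    (group : List (List (String × Int))) : Int × Option (List (List (String × Int))) × Int :=
  let n : Int := group.length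
  if n > acc.1 then (n, some group, 1)
  else if n = acc.1 then (acc.1, acc.2.1, acc.2.2 + 1)
  else acc

def unique_top_group_py_alt (groups : List (List (List (String × Int)))) : Option (List (List (String × Int))) :=
  let fin := groups.foldl pvStep (-1, none, 0)
  if fin.2.2 = 1 then fin.2.1 else none

-- ===== PRECONDITION & SPEC =====
def Spec_unique_top_group_py (groups : List (List (List (String × Int)))) (out : Option (List (List (String × Int)))) : Prop := out = unique_top_group_py_alt groups
instance (groups : List (List (List (String × Int)))) (out : Option (List (List (String × Int)))) : Decidable (Spec_unique_top_group_py groups out) := by unfold Spec_unique_top_group_py; infer_instance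

-- ===== CLAIM (what is proved, stated in full; the proofs are below) =====
def Claim_equal_unique_top_group_py : Prop := ∀ (groups : List (List (List (String × Int)))), Dom_unique_top_group_py groups → Spec_unique_top_group_py groups (unique_top_group_py groups)

-- ===== LEMMAS AND PROOFS =====

-- maximum of the group lengths, -1 for the empty list (B's initial best_size)
def pvMx (gs : List (List (List (String × Int)))) : Int :=
  gs.foldr (fun g a => max ((g.length : Int)) a) (-1)

theorem pvMx_nil : pvMx [] = -1 := rfl

theorem pvMx_cons (g : List (List (String × Int))) (t : List (List (List (String × Int)))) :
    pvMx (g :: t) = max ((g.length : Int)) (pvMx t) := rfl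

theorem pvMx_ub (gs : List (List (List (String × Int)))) :
    ∀ g ∈ gs, (g.length : Int) ≤ pvMx gs := by
  induction gs with
  | nil => intro g h; cases h
  | cons a t ih =>
    intro g h
    rw [List.mem_cons] at h
    rcases h with rfl | h
    · simp [pvMx_cons]
    · have := ih g h
      rw [pvMx_cons]
      omega

theorem pvMx_mem (gs : List (List (List (String × Int)))) (h : gs ≠ []) :
    ∃ g ∈ gs, (g.length : Int) = pvMx gs := by
  induction gs with
  | nil => exact absurd rfl h
  | cons a t ih =>
    by_cases ht : t = []
    · subst ht
      exact ⟨a, by simp, by simp [pvMx_cons, pvMx_nil]⟩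
    · rcases ih ht with ⟨g, hg, hlen⟩
      by_cases hle : pvMx t ≤ (a.length : Int)
      · exact ⟨a, by simp, by rw [pvMx_cons]; omega⟩
      · exact ⟨g, by simp [hg], by rw [pvMx_cons]; omega⟩

-- characterization of B's fold from any state with best_size ≥ -1
theorem pv_foldB (gs : List (List (List (String × Int)))) :
    ∀ (bs : Int) (bg : Option (List (List (String × Int)))) (cnt : Int), -1 ≤ bs →
    gs.foldl pvStep (bs, bg, cnt) =
      if pvMx gs ≤ bs then
        (bs, bg, cnt + ((gs.filter (fun g => (g.length : Int) == bs)).length : Int))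
      else
        (pvMx gs, (gs.filter (fun g => (g.length : Int) == pvMx gs)).head?,
         ((gs.filter (fun g => (g.length : Int) == pvMx gs)).length : Int)) := by
  induction gs with
  | nil =>
    intro bs bg cnt hbs
    simp [pvMx_nil]
    omega
  | cons a t ih =>
    intro bs bg cnt hbs
    rw [List.foldl_cons]
    have hn : (0 : Int) ≤ (a.length : Int) := by positivity
    by_cases h1 : (a.length : Int) > bs
    · rw [show pvStep (bs, bg, cnt) a = ((a.length : Int), some a, 1) by
        simp [pvStep, h1]]
      rw [ih _ _ _ (by omega)]
      rw [pvMx_cons]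
      by_cases h2 : pvMx t ≤ (a.length : Int)
      · have hmax : max ((a.length : Int)) (pvMx t) = (a.length : Int) := by omega
        rw [if_pos h2, hmax, if_neg (by omega)]
        simp
        omega
      · have hmax : max ((a.length : Int)) (pvMx t) = pvMx t := by omega
        rw [if_neg h2, hmax, if_neg (by omega)]
        have hne : ¬ ((a.length : Int) == pvMx t) = true := by
          simp; omega
        simp [hne]
    · by_cases heq : (a.length : Int) = bs
      · rw [show pvStep (bs, bg, cnt) a = (bs, bg, cnt + 1) by
          simp [pvStep, heq]]
        rw [ih _ _ _ hbs, pvMx_cons]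
        by_cases h2 : pvMx t ≤ bs
        · have hmax : max ((a.length : Int)) (pvMx t) ≤ bs := by omega
          rw [if_pos h2, if_pos hmax]
          have hyes : ((a.length : Int) == bs) = true := by simp [heq]
          simp [hyes]
          omega
        · have hmax : ¬ max ((a.length : Int)) (pvMx t) ≤ bs := by omega
          rw [if_neg h2, if_neg hmax]
          have hmx : max ((a.length : Int)) (pvMx t) = pvMx t := by omega
          have hne : ¬ ((a.length : Int) == pvMx t) = true := by simp; omega
          simp [hne, hmx]
      · rw [show pvStep (bs, bg, cnt) a = (bs, bg, cnt) by
          simp [pvStep, h1, heq]]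
        rw [ih _ _ _ hbs, pvMx_cons]
        by_cases h2 : pvMx t ≤ bs
        · have hmax : max ((a.length : Int)) (pvMx t) ≤ bs := by omega
          rw [if_pos h2, if_pos hmax]
          have hne : ¬ ((a.length : Int) == bs) = true := by simp; omega
          simp [hne]
        · have hmax : ¬ max ((a.length : Int)) (pvMx t) ≤ bs := by omega
          rw [if_neg h2, if_neg hmax]
          have hmx : max ((a.length : Int)) (pvMx t) = pvMx t := by omega
          have hne : ¬ ((a.length : Int) == pvMx t) = true := by simp; omega
          simp [hne, hmx]

-- ===== VERDICT (by name: the statement is the Claim_ definition above) =====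
theorem unique_top_group_py_spec : Claim_equal_unique_top_group_py := by
  intro groups _
  unfold Spec_unique_top_group_py unique_top_group_py unique_top_group_py_alt
  by_cases hnil : groups = []
  · subst hnil; decide
  · rw [if_neg hnil]
    -- the maximum exists and equals pvMx
    rcases pvMx_mem groups hnil with ⟨g0, hg0, hlen0⟩
    have hmx0 : 0 ≤ pvMx groups := by
      rw [← hlen0]; positivity
    obtain ⟨M, hM⟩ : ∃ M, PySem.List.max? (groups.map (fun group => (group.length : Int))) id = some M := by
      cases hmax : PySem.List.max? (groups.map (fun group => (group.length : Int))) id with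
      | none =>
        rw [PySem.List.max?_eq_none_iff] at hmax
        simp at hmax
        exact absurd hmax hnil
      | some M => exact ⟨M, rfl⟩
    have hMmem : M ∈ groups.map (fun group => (group.length : Int)) := PySem.List.max?_mem hM
    have hMub := PySem.List.max?_isMax hM
    have hMeq : M = pvMx groups := by
      apply le_antisymm
      · simp only [List.mem_map] at hMmem
        rcases hMmem with ⟨g, hg, rfl⟩
        exact pvMx_ub groups g hg
      · have := hMub ((g0.length : Int)) (by simp; exact ⟨g0, hg0, rfl⟩)
        simpa [hlen0] using this
    have hng : ¬ pvMx groups ≤ -1 := by omega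
    simp only [hM, hMeq]
    rw [pv_foldB groups (-1) none 0 (by norm_num)]
    simp only [if_neg hng]
    by_cases hone : (groups.filter (fun group => ((group.length : Int)) == pvMx groups)).length = 1
    · rcases List.length_eq_one_iff.mp hone with ⟨x, hx⟩
      rw [hx]
      simp
    · have h2 : ¬ (((groups.filter (fun group => ((group.length : Int)) == pvMx groups)).length : Int)) = 1 := by
        exact_mod_cast hone
      simp [hone, h2]
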